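-- pv_equiv track=rewrite | github.com/alisson728/sistema-financeiro-web | backend/utils.py | month_iter
-- ===== SOURCE A (Python) =====
-- from typing import Iterable
--
-- def month_iter(start_year: int, start_month: int, end_year: int, end_month: int) -> Iterable[tuple[int, int]]:
--     year, month = start_year, start_month
--     while (year < end_year) or (year == end_year and month <= end_month):
--         yield year, month
--         month += 1
--         if month > 12:
--             year += 1
--             month = 1
-- ===== SOURCE B (Python) =====
-- def month_iter(start_year: int, start_month: int, end_year: int, end_month: int):
--     s = start_year * 12 + (start_month - 1)
--     e = end_year * 12 + (end_month - 1)
--     for i in range(s, e + 1):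
--         yield i // 12, i % 12 + 1
-- ===== Notes on version B (the rewrite author's own statement) =====
-- stated objective: simpler
-- what changed: Replaces the carry-increment (month+=1, reset at 12) while-loop state machine with a single flat range over absolute month ordinals decoded by divmod.
-- outside the precondition, e.g. on month_iter(2020, 13, 2021, 1): A returns [(2020, 13), (2021, 1)], B returns [(2021, 1)]
import Mathlib
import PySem

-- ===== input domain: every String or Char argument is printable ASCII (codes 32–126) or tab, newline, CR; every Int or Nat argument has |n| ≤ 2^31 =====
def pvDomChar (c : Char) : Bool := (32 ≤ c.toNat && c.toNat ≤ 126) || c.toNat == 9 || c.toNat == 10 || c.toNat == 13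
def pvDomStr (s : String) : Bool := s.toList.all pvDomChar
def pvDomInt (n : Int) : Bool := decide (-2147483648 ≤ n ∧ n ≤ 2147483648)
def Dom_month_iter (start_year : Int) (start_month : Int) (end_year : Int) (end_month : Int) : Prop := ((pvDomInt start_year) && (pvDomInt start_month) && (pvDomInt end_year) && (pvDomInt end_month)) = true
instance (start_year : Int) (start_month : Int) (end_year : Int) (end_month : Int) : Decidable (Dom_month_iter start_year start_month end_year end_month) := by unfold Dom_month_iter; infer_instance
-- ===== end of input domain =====

-- B replaces A's carry-increment (month+=1, reset past 12) state machine with one flat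
-- range over absolute month ordinals decoded by divmod: a simpler decomposition, same cost.

-- ===== PORT A =====
-- A's while-loop, step for step; the fuel is only a totality guard: it over-approximates
-- the number of iterations for EVERY input (at most one partial first year, then 12 per year).
def month_iter_loop (fuel : Nat) (end_year end_month year month : Int) : List (Int × Int) :=
  match fuel with
  | 0 => []
  | f + 1 =>
    if year < end_year ∨ (year = end_year ∧ month ≤ end_month) then
      let month' := month + 1
      if month' > 12 then
        (year, month) :: month_iter_loop f end_year end_month (year + 1) 1
      else
        (year, month) :: month_iter_loop f end_year end_month year month'
    else []

def month_iter (start_year : Int) (start_month : Int) (end_year : Int) (end_month : Int) : List (Int × Int) :=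
  month_iter_loop (13 + start_month.natAbs + 12 * ((end_year - start_year).toNat + 1))
    end_year end_month start_year start_month

-- ===== PORT B =====
def month_iter_alt (start_year : Int) (start_month : Int) (end_year : Int) (end_month : Int) : List (Int × Int) :=
  let s := start_year * 12 + (start_month - 1)
  let e := end_year * 12 + (end_month - 1)
  (PySem.List.pyRange s (e + 1) 1).map
    (fun i => (PySem.Int.floordiv i 12, PySem.Int.mod i 12 + 1))

-- ===== PRECONDITION & SPEC =====
-- Pre_ admits the calendar-month domain 1..12, plus every input whose range is empty for
-- both stop tests (both programs return []); it excludes only out-of-range month arguments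
-- with a nonempty range, where A yields the raw out-of-range month on its first step, an
-- artefact of the increment-then-reset loop that no caller passing real months can hit.
def Pre_month_iter (start_year : Int) (start_month : Int) (end_year : Int) (end_month : Int) : Prop :=
  (1 ≤ start_month ∧ start_month ≤ 12 ∧ 1 ≤ end_month ∧ end_month ≤ 12) ∨
  ((start_year > end_year ∨ (start_year = end_year ∧ start_month > end_month)) ∧
   end_year * 12 + end_month < start_year * 12 + start_month)
instance (start_year : Int) (start_month : Int) (end_year : Int) (end_month : Int) : Decidable (Pre_month_iter start_year start_month end_year end_month) := by unfold Pre_month_iter; infer_instance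

def pvWitness_month_iter : Int × Int × Int × Int := (2023, 11, 2024, 2)

def Spec_month_iter (start_year : Int) (start_month : Int) (end_year : Int) (end_month : Int) (out : List (Int × Int)) : Prop := out = month_iter_alt start_year start_month end_year end_month
instance (start_year : Int) (start_month : Int) (end_year : Int) (end_month : Int) (out : List (Int × Int)) : Decidable (Spec_month_iter start_year start_month end_year end_month out) := by unfold Spec_month_iter; infer_instance

-- ===== CLAIM (what is proved, stated in full; the proofs are below) =====
def Claim_equal_month_iter : Prop := ∀ (start_year : Int) (start_month : Int) (end_year : Int) (end_month : Int), Dom_month_iter start_year start_month end_year end_month → Pre_month_iter start_year start_month end_year end_month → Spec_month_iter start_year start_month end_year end_month (month_iter start_year start_month end_year end_month)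

-- ===== LEMMAS AND PROOFS =====

-- A's loop returns [] whenever the lexicographic stop test already fails.
theorem month_iter_loop_nil (fuel : Nat) (ey em y m : Int)
    (h : ¬ (y < ey ∨ (y = ey ∧ m ≤ em))) :
    month_iter_loop fuel ey em y m = [] := by
  cases fuel with
  | zero => rfl
  | succ f => rw [month_iter_loop, if_neg h]

-- Decoding an ordinal y*12 + (m-1) with m in 1..12 recovers (y, m).
theorem month_decode (y m : Int) (h1 : 1 ≤ m) (h2 : m ≤ 12) :
    PySem.Int.floordiv (y * 12 + (m - 1)) 12 = y ∧
    PySem.Int.mod (y * 12 + (m - 1)) 12 + 1 = m := by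
  rw [PySem.Int.floordiv_eq_ediv_of_pos (by norm_num),
      PySem.Int.mod_eq_emod_of_pos (by norm_num)]
  omega

-- Loop invariant: with months in 1..12 and exact fuel, A's loop lists the decoded ordinals.
theorem month_iter_loop_eq (fuel : Nat) (ey em y m : Int)
    (h1 : 1 ≤ m) (h2 : m ≤ 12) (h3 : 1 ≤ em) (h4 : em ≤ 12)
    (hf : (ey * 12 + em - (y * 12 + m) + 1).toNat ≤ fuel) :
    month_iter_loop fuel ey em y m =
      (PySem.List.pyRange (y * 12 + (m - 1)) (ey * 12 + (em - 1) + 1) 1).map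
        (fun i => (PySem.Int.floordiv i 12, PySem.Int.mod i 12 + 1)) := by
  induction fuel generalizing y m with
  | zero =>
    have hle : ey * 12 + (em - 1) + 1 ≤ y * 12 + (m - 1) := by omega
    rw [PySem.List.pyRange_one_eq_nil hle]
    rfl
  | succ f ih =>
    by_cases hlt : y * 12 + (m - 1) < ey * 12 + (em - 1) + 1
    case neg =>
      rw [PySem.List.pyRange_one_eq_nil (by omega), List.map_nil, month_iter_loop,
        if_neg (by omega)]
    rw [month_iter_loop, PySem.List.pyRange_one_cons hlt, List.map_cons]
    have hcond : y < ey ∨ (y = ey ∧ m ≤ em) := by omega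
    rw [if_pos hcond]
    obtain ⟨hd1, hd2⟩ := month_decode y m h1 h2
    by_cases h12 : m + 1 > 12
    · rw [if_pos h12]
      have := ih (y + 1) 1 (by omega) (by omega) (by omega)
      rw [this]
      have : (y + 1) * 12 + (1 - 1) = y * 12 + (m - 1) + 1 := by omega
      rw [this, hd1, hd2]
    · rw [if_neg h12]
      have := ih y (m + 1) (by omega) (by omega) (by omega)
      rw [this]
      have : y * 12 + (m + 1 - 1) = y * 12 + (m - 1) + 1 := by omega
      rw [this, hd1, hd2]

-- ===== VERDICT (by name: the statement is the Claim_ definition above) =====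
theorem month_iter_spec : Claim_equal_month_iter := by
  intro sy sm ey em _ hpre
  unfold Spec_month_iter month_iter month_iter_alt
  rcases hpre with ⟨h1, h2, h3, h4⟩ | ⟨hlex, hord⟩
  · exact month_iter_loop_eq _ ey em sy sm h1 h2 h3 h4 (by omega)
  · show month_iter_loop _ ey em sy sm =
      List.map _ (PySem.List.pyRange (sy * 12 + (sm - 1)) (ey * 12 + (em - 1) + 1) 1)
    rw [PySem.List.pyRange_one_eq_nil (by omega), List.map_nil,
      month_iter_loop_nil _ ey em sy sm (by omega)]
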